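-- pv_equiv track=rewrite | github.com/FridahWatetuMuthoni/Data-Structures-Algorithms | Graphs/app.py | adjacency_nodes
-- ===== SOURCE A (Python) =====
-- edges = [
--     ['A','B'],
--     ['A','D'],
--     ['B','C'],
--     ['C','D'],
--     ['C','E'],
--     ['D','E']
-- ]
--
-- def adjacency_nodes(node):
--     results = []
--
--     for arr in edges:
--         if arr[0] == node:
--             results.append(arr[1])
--         if arr[1] == node:
--             results.append(arr[0])
--     return results
-- ===== SOURCE B (Python) =====
-- edges = [
--     ['A','B'],
--     ['A','D'],
--     ['B','C'],
--     ['C','D'],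
--     ['C','E'],
--     ['D','E']
-- ]
--
-- # adjacency dictionary built ONCE over the edge list, in edge order
-- _adj = {}
-- for _u, _v in edges:
--     _adj.setdefault(_u, []).append(_v)
--     _adj.setdefault(_v, []).append(_u)
--
-- def adjacency_nodes(node):
--     return list(_adj.get(node, []))
-- ===== Notes on version B (the rewrite author's own statement) =====
-- stated objective: idiomatic
-- what changed: B precomputes an adjacency dictionary once over the edge list (appending both endpoints in edge order) and answers each query by a single dictionary lookup returning a fresh copy, instead of re-scanning every edge per call.
import Mathlib
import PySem

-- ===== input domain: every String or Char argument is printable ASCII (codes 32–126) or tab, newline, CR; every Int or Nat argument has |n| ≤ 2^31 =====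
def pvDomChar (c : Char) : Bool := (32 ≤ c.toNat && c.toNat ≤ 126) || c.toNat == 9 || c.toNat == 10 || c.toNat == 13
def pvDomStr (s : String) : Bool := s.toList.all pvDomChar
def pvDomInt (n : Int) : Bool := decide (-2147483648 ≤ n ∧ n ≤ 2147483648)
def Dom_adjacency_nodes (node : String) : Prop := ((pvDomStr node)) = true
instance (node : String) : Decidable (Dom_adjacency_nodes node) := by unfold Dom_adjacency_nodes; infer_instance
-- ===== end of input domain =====

-- B replaces A's per-call scan of all edges by an adjacency dictionary built once
-- over the edge list, answering each call with a single lookup (idiomatic; same result).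

-- the module-level 'edges' constant
def pvEdges : List (String × String) :=
  [("A","B"), ("A","D"), ("B","C"), ("C","D"), ("C","E"), ("D","E")]

-- ===== PORT A =====
def adjacency_nodes (node : String) : List String :=
  pvEdges.foldl (fun results arr =>
    let results := if arr.1 == node then results ++ [arr.2] else results
    if arr.2 == node then results ++ [arr.1] else results) []

-- ===== PORT B =====
-- _adj: built once by one pass over edges (setdefault(..).append = modify with default [])
def pvAdj : PySem.Dict String (List String) :=
  pvEdges.foldl (fun d e =>
    (d.modify e.1 [] (· ++ [e.2])).modify e.2 [] (· ++ [e.1])) PySem.Dict.empty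

def adjacency_nodes_alt (node : String) : List String :=
  pvAdj.getD node []

-- ===== PRECONDITION & SPEC =====
def Spec_adjacency_nodes (node : String) (out : List String) : Prop := out = adjacency_nodes_alt node
instance (node : String) (out : List String) : Decidable (Spec_adjacency_nodes node out) := by unfold Spec_adjacency_nodes; infer_instance

-- ===== CLAIM (what is proved, stated in full; the proofs are below) =====
def Claim_equal_adjacency_nodes : Prop := ∀ (node : String), Dom_adjacency_nodes node → Spec_adjacency_nodes node (adjacency_nodes node)

-- ===== LEMMAS AND PROOFS =====

theorem pvAdj_eq : pvAdj = PySem.Dict.mk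
    [("A", ["B", "D"]), ("B", ["A", "C"]), ("D", ["A", "C", "E"]),
     ("C", ["B", "D", "E"]), ("E", ["C", "D"])] := by decide

-- ===== VERDICT (by name: the statement is the Claim_ definition above) =====
theorem adjacency_nodes_spec : Claim_equal_adjacency_nodes := by
  intro node _
  unfold Spec_adjacency_nodes
  by_cases hA : node = "A"; · subst hA; decide
  by_cases hB : node = "B"; · subst hB; decide
  by_cases hC : node = "C"; · subst hC; decide
  by_cases hD : node = "D"; · subst hD; decide
  by_cases hE : node = "E"; · subst hE; decide
  simp [adjacency_nodes, adjacency_nodes_alt, pvEdges, pvAdj_eq, List.foldl,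
    PySem.Dict.getD_eq_get?_getD, PySem.Dict.get?,
    Ne.symm hA, Ne.symm hB, Ne.symm hC, Ne.symm hD, Ne.symm hE]
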